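-- pv_equiv track=rewrite | github.com/ds-gurukandhamoorthi/intro-python-exs | lindenmayer.py | lindenmayer
-- ===== SOURCE A (Python) =====
-- def lindenmayer(frm, production_rules,nb_transf=1):
--     if nb_transf < 1:
--         return frm
--     transformed = ''.join(production_rules.get(c, c) for c in frm)
--     if nb_transf == 1:
--         return transformed
--     return lindenmayer(transformed, production_rules, nb_transf - 1)
--
--     return
-- ===== SOURCE B (Python) =====
-- def lindenmayer(frm, production_rules, nb_transf=1):
--     result = frm
--     for _ in range(nb_transf):
--         result = ''.join(production_rules.get(c, c) for c in result)
--     return result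
-- ===== Notes on version B (the rewrite author's own statement) =====
-- stated objective: simpler
-- what changed: Replaces the guarded recursion on the counter with a plain iterative loop: result starts as frm and the per-character expansion is applied nb_transf times (range handles nb_transf < 1 naturally).
import Mathlib
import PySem

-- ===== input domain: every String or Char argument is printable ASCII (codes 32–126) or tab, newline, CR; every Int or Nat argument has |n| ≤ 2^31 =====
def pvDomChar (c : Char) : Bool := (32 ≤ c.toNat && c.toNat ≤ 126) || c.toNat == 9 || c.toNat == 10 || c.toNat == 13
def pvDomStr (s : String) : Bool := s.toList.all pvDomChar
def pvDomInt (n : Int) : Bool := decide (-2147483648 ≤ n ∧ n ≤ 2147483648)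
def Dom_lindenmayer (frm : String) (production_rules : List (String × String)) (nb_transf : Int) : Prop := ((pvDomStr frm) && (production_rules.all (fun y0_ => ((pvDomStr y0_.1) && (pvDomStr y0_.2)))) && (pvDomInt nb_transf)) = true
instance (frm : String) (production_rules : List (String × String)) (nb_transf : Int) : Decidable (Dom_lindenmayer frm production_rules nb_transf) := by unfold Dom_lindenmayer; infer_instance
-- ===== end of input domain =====

-- B replaces A's guarded recursion on the counter by an explicit loop applying the
-- per-character expansion nb_transf times (objective: simpler).

-- ===== PORT A =====
-- ''.join(production_rules.get(c, c) for c in frm)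
def pvExpandA (production_rules : List (String × String)) (frm : String) : String :=
  PySem.Str.join "" (frm.toList.map (fun c =>
    (PySem.Dict.ofList production_rules).getD (String.mk [c]) (String.mk [c])))

def lindenmayer (frm : String) (production_rules : List (String × String)) (nb_transf : Int) : String :=
  if nb_transf < 1 then frm
  else
    let transformed := pvExpandA production_rules frm
    if nb_transf == 1 then transformed
    else lindenmayer transformed production_rules (nb_transf - 1)
termination_by nb_transf.toNat
decreasing_by omega

-- ===== PORT B =====
-- B's loop body ''.join(production_rules.get(c, c) for c in result) is the identical
-- expression to A's, so the helper pvExpandA is shared.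
-- for _ in range(nb_transf): result = expand(result)
def pvLoopB (production_rules : List (String × String)) : Nat → String → String
  | 0, result => result
  | n + 1, result => pvLoopB production_rules n (pvExpandA production_rules result)

def lindenmayer_alt (frm : String) (production_rules : List (String × String)) (nb_transf : Int) : String :=
  pvLoopB production_rules nb_transf.toNat frm

-- ===== PRECONDITION & SPEC =====
-- Pre_ excludes only nb_transf >= 997, on which A's one-recursive-call-per-step recursion
-- exceeds CPython's default recursion limit and raises RecursionError (A returns on all
-- nb_transf <= 996, and all those are inside Pre_).
def Pre_lindenmayer (frm : String) (production_rules : List (String × String)) (nb_transf : Int) : Prop := nb_transf ≤ 996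
instance (frm : String) (production_rules : List (String × String)) (nb_transf : Int) : Decidable (Pre_lindenmayer frm production_rules nb_transf) := by unfold Pre_lindenmayer; infer_instance
def pvWitness_lindenmayer : String × (List (String × String)) × Int := ("ab", [("a", "ab"), ("b", "a")], 3)

def Spec_lindenmayer (frm : String) (production_rules : List (String × String)) (nb_transf : Int) (out : String) : Prop := out = lindenmayer_alt frm production_rules nb_transf
instance (frm : String) (production_rules : List (String × String)) (nb_transf : Int) (out : String) : Decidable (Spec_lindenmayer frm production_rules nb_transf out) := by unfold Spec_lindenmayer; infer_instance

-- ===== CLAIM (what is proved, stated in full; the proofs are below) =====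
def Claim_equal_lindenmayer : Prop := ∀ (frm : String) (production_rules : List (String × String)) (nb_transf : Int), Dom_lindenmayer frm production_rules nb_transf → Pre_lindenmayer frm production_rules nb_transf → Spec_lindenmayer frm production_rules nb_transf (lindenmayer frm production_rules nb_transf)

-- ===== LEMMAS AND PROOFS =====
theorem lindenmayer_eq_loop (production_rules : List (String × String)) :
    ∀ (n : Nat) (nb_transf : Int), nb_transf.toNat = n →
      ∀ (frm : String), lindenmayer frm production_rules nb_transf = pvLoopB production_rules n frm := by
  intro n
  induction n with
  | zero =>
      intro nb h frm
      rw [lindenmayer]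
      have hlt : nb < 1 := by omega
      simp [hlt, pvLoopB]
  | succ m ih =>
      intro nb h frm
      rw [lindenmayer]
      have hge : ¬ nb < 1 := by omega
      by_cases h1 : nb = 1
      · have hm : m = 0 := by omega
        simp [h1, hm, pvLoopB]
      · have hne : (nb == 1) = false := by simp [h1]
        have hm : (nb - 1).toNat = m := by omega
        simp only [hge, if_false, hne]
        rw [ih (nb - 1) hm (pvExpandA production_rules frm)]
        simp [pvLoopB]

-- ===== VERDICT (by name: the statements are the Claim_ definitions above) =====
theorem lindenmayer_spec : Claim_equal_lindenmayer := by
  intro frm production_rules nb_transf _ _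
  unfold Spec_lindenmayer lindenmayer_alt
  exact lindenmayer_eq_loop production_rules nb_transf.toNat nb_transf rfl frm
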